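-- pv_equiv track=rewrite | github.com/xycoord/Language-Modelling | tests/tokenizers/bpe/test_merge_pair_track_deltas.py | deltas_are_equal
-- ===== SOURCE A (Python) =====
-- def deltas_are_equal(deltas_1, deltas_2) -> bool:
--     """Check if two delta dicts are equivalent, ignoring zero values"""
--     all_pairs = set(deltas_1.keys()) | set(deltas_2.keys())
--
--     for pair in all_pairs:
--         val_1 = deltas_1.get(pair, 0)
--         val_2 = deltas_2.get(pair, 0)
--         # Only compare if at least one is non-zero
--         if val_1 != 0 or val_2 != 0:
--             if val_1 != val_2:
--                 return False
--     return True
-- ===== SOURCE B (Python) =====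
-- def deltas_are_equal(deltas_1, deltas_2) -> bool:
--     """Check if two delta dicts are equivalent, ignoring zero values"""
--     stripped_1 = {k: v for k, v in deltas_1.items() if v != 0}
--     stripped_2 = {k: v for k, v in deltas_2.items() if v != 0}
--     return stripped_1 == stripped_2
-- ===== Notes on version B (the rewrite author's own statement) =====
-- stated objective: simpler
-- what changed: A iterates over the union of both key sets with per-key lookups and an early return; B instead builds a zero-stripped copy of each dict and returns a single built-in dict equality comparison.
import Mathlib
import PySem

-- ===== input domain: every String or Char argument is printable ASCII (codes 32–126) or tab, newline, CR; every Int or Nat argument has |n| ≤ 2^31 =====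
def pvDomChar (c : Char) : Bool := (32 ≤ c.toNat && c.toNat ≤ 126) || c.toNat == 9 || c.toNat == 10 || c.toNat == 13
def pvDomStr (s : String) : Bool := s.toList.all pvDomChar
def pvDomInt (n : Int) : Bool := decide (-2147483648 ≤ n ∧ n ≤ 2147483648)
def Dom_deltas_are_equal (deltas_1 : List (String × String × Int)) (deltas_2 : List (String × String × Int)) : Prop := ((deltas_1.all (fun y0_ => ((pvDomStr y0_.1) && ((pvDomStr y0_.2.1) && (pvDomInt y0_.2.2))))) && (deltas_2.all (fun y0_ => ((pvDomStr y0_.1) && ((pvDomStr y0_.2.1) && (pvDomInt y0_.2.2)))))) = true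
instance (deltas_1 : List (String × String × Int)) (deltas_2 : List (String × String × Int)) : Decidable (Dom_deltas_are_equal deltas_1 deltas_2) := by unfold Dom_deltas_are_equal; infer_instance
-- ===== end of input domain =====

-- B replaces A's scan over the union of key sets (with early return and per-key lookups)
-- by stripping zero entries from each dict and one dict equality; objective: simpler.

-- The input association lists are read as Python dicts ((s1,s2) → v, last value wins).
def pvAsDict (d : List (String × String × Int)) : PySem.Dict (String × String) Int :=
  PySem.Dict.ofList (d.map (fun p => ((p.1, p.2.1), p.2.2)))

-- ===== PORT A =====
-- the 'for pair in all_pairs: … return False' loop (result is iteration-order independent)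
def pvLoopA (D1 D2 : PySem.Dict (String × String) Int) : List (String × String) → Bool
  | [] => true
  | k :: rest =>
    let val_1 := D1.getD k 0
    let val_2 := D2.getD k 0
    if val_1 ≠ 0 ∨ val_2 ≠ 0 then
      if val_1 ≠ val_2 then false else pvLoopA D1 D2 rest
    else pvLoopA D1 D2 rest

def deltas_are_equal (deltas_1 : List (String × String × Int)) (deltas_2 : List (String × String × Int)) : Bool :=
  let D1 := pvAsDict deltas_1
  let D2 := pvAsDict deltas_2
  let all_pairs := PySem.Set.union (PySem.Set.ofList D1.keys) (PySem.Set.ofList D2.keys)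
  pvLoopA D1 D2 all_pairs

-- ===== PORT B =====
-- Python dict == ignores insertion order: equal sizes and pointwise-equal lookups.
def pvDictEqB (S1 S2 : PySem.Dict (String × String) Int) : Bool :=
  S1.size == S2.size && S1.items.all (fun p => S2.get? p.1 == some p.2)

def deltas_are_equal_alt (deltas_1 : List (String × String × Int)) (deltas_2 : List (String × String × Int)) : Bool :=
  let stripped_1 := PySem.Dict.mk ((pvAsDict deltas_1).items.filter (fun p => p.2 ≠ 0))
  let stripped_2 := PySem.Dict.mk ((pvAsDict deltas_2).items.filter (fun p => p.2 ≠ 0))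
  pvDictEqB stripped_1 stripped_2

-- ===== PRECONDITION & SPEC =====
def Spec_deltas_are_equal (deltas_1 : List (String × String × Int)) (deltas_2 : List (String × String × Int)) (out : Bool) : Prop := out = deltas_are_equal_alt deltas_1 deltas_2
instance (deltas_1 : List (String × String × Int)) (deltas_2 : List (String × String × Int)) (out : Bool) : Decidable (Spec_deltas_are_equal deltas_1 deltas_2 out) := by unfold Spec_deltas_are_equal; infer_instance

-- ===== CLAIM (what is proved, stated in full; the proofs are below) =====
def Claim_equal_deltas_are_equal : Prop := ∀ (deltas_1 : List (String × String × Int)) (deltas_2 : List (String × String × Int)), Dom_deltas_are_equal deltas_1 deltas_2 → Spec_deltas_are_equal deltas_1 deltas_2 (deltas_are_equal deltas_1 deltas_2)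

-- ===== LEMMAS AND PROOFS =====

-- the stripped dict of B, as a function of any dict D
def pvStrip (D : PySem.Dict (String × String) Int) : PySem.Dict (String × String) Int :=
  PySem.Dict.mk (D.items.filter (fun p => p.2 ≠ 0))

theorem pvStrip_keys_nodup (D : PySem.Dict (String × String) Int)
    (h : D.keys.Nodup) : (pvStrip D).keys.Nodup := by
  simp only [pvStrip, PySem.Dict.keys_mk]
  exact (List.Sublist.map Prod.fst List.filter_sublist).nodup h

theorem pvStrip_get? (D : PySem.Dict (String × String) Int)
    (h : D.keys.Nodup) (k : String × String) :
    (pvStrip D).get? k = if D.getD k 0 = 0 then none else some (D.getD k 0) := by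
  rcases hg : D.get? k with _ | v
  · have hk : k ∉ (pvStrip D).keys := by
      simp only [pvStrip, PySem.Dict.keys_mk]
      intro hmem
      rcases List.mem_map.1 hmem with ⟨p, hp, hpk⟩
      have : D.get? p.1 = some p.2 :=
        (PySem.Dict.get?_eq_some_iff_mem_items D p.1 p.2 h).2 (List.mem_of_mem_filter hp)
      rw [hpk, hg] at this; cases this
    rw [(PySem.Dict.get?_eq_none_iff_not_mem_keys _ _).2 hk,
        PySem.Dict.getD_of_get?_eq_none D 0 hg]
    simp
  · rw [PySem.Dict.getD_of_get?_eq_some D 0 hg]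
    by_cases hv : v = 0
    · subst hv
      have hk : k ∉ (pvStrip D).keys := by
        simp only [pvStrip, PySem.Dict.keys_mk]
        intro hmem
        rcases List.mem_map.1 hmem with ⟨p, hp, hpk⟩
        have hpi : D.get? p.1 = some p.2 :=
          (PySem.Dict.get?_eq_some_iff_mem_items D p.1 p.2 h).2 (List.mem_of_mem_filter hp)
        have hnz : p.2 ≠ 0 := by
          have := List.of_mem_filter hp; simpa using this
        rw [hpk, hg] at hpi
        exact hnz (Option.some.inj hpi).symm
      rw [(PySem.Dict.get?_eq_none_iff_not_mem_keys _ _).2 hk]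
      simp
    · have hmem : (k, v) ∈ (pvStrip D).items := by
        simp only [pvStrip]
        refine List.mem_filter.2 ⟨(PySem.Dict.get?_eq_some_iff_mem_items D k v h).1 hg, by simpa using hv⟩
      rw [(PySem.Dict.get?_eq_some_iff_mem_items _ k v (pvStrip_keys_nodup D h)).2 hmem]
      simp [hv]

-- A's loop is an 'all' over the key list
theorem pvLoopA_eq_all (D1 D2 : PySem.Dict (String × String) Int) (ks : List (String × String)) :
    pvLoopA D1 D2 ks = ks.all (fun k => D1.getD k 0 == D2.getD k 0) := by
  induction ks with
  | nil => rfl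
  | cons k rest ih =>
    simp only [pvLoopA, List.all_cons, ih]
    by_cases h1 : D1.getD k 0 ≠ 0 ∨ D2.getD k 0 ≠ 0
    · by_cases h2 : D1.getD k 0 ≠ D2.getD k 0
      · simp [h1, h2]
      · simp only [not_not] at h2; simp [h2]
    · rw [not_or, not_not, not_not] at h1
      simp [h1.1, h1.2]

theorem pvLoopA_true_iff (D1 D2 : PySem.Dict (String × String) Int) :
    pvLoopA D1 D2 (PySem.Set.union (PySem.Set.ofList D1.keys) (PySem.Set.ofList D2.keys)) = true
      ↔ ∀ k, D1.getD k 0 = D2.getD k 0 := by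
  rw [pvLoopA_eq_all]
  simp only [List.all_eq_true, beq_iff_eq]
  constructor
  · intro h k
    by_cases hk : k ∈ PySem.Set.union (PySem.Set.ofList D1.keys) (PySem.Set.ofList D2.keys)
    · exact h k hk
    · rw [PySem.Set.mem_union] at hk
      rw [not_or, PySem.Set.mem_ofList, PySem.Set.mem_ofList] at hk
      rw [PySem.Dict.getD_of_get?_eq_none D1 0 ((PySem.Dict.get?_eq_none_iff_not_mem_keys _ _).2 hk.1),
          PySem.Dict.getD_of_get?_eq_none D2 0 ((PySem.Dict.get?_eq_none_iff_not_mem_keys _ _).2 hk.2)]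
  · intro h k _; exact h k

-- B's dict comparison is pointwise equality of lookups (for nodup-key dicts)
theorem pvDictEqB_true_iff (S1 S2 : PySem.Dict (String × String) Int)
    (h1 : S1.keys.Nodup) (h2 : S2.keys.Nodup) :
    pvDictEqB S1 S2 = true ↔ ∀ k, S1.get? k = S2.get? k := by
  simp only [pvDictEqB, Bool.and_eq_true, beq_iff_eq, List.all_eq_true]
  constructor
  · rintro ⟨hsz, hall⟩ k
    rcases hg : S1.get? k with _ | v
    · rcases hg2 : S2.get? k with _ | w
      · rfl
      · exfalso
        have hsub : S1.keys ⊆ S2.keys := by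
          intro x hx
          rcases hgx : S1.get? x with _ | vx
          · exact absurd hx ((PySem.Dict.get?_eq_none_iff_not_mem_keys _ _).1 hgx)
          · have hix := (PySem.Dict.get?_eq_some_iff_mem_items S1 x vx h1).1 hgx
            have : S2.get? x = some vx := hall (x, vx) hix
            exact PySem.Dict.mem_keys_of_mem_items _
              ((PySem.Dict.get?_eq_some_iff_mem_items S2 x vx h2).1 this)
        have hlen : S2.keys.length ≤ S1.keys.length := by
          have e1 : S1.size = S1.keys.length := by
            simp [PySem.Dict.size, PySem.Dict.keys]
          have e2 : S2.size = S2.keys.length := by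
            simp [PySem.Dict.size, PySem.Dict.keys]
          omega
        have hperm := (h1.subperm hsub).perm_of_length_le hlen
        have : k ∈ S1.keys := hperm.mem_iff.2
          (PySem.Dict.mem_keys_of_mem_items _
            ((PySem.Dict.get?_eq_some_iff_mem_items S2 k w h2).1 hg2))
        exact ((PySem.Dict.get?_eq_none_iff_not_mem_keys _ _).1 hg) this
    · have := hall (k, v) ((PySem.Dict.get?_eq_some_iff_mem_items S1 k v h1).1 hg)
      exact this.symm
  · intro h
    constructor
    · have hperm : S1.keys.Perm S2.keys := by
        apply List.perm_of_nodup_nodup_toFinset_eq h1 h2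
        ext x
        simp only [List.mem_toFinset]
        constructor
        · intro hx
          rcases hgx : S1.get? x with _ | vx
          · exact absurd hx ((PySem.Dict.get?_eq_none_iff_not_mem_keys _ _).1 hgx)
          · have : S2.get? x = some vx := (h x) ▸ hgx
            exact PySem.Dict.mem_keys_of_mem_items _
              ((PySem.Dict.get?_eq_some_iff_mem_items S2 x vx h2).1 this)
        · intro hx
          rcases hgx : S2.get? x with _ | vx
          · exact absurd hx ((PySem.Dict.get?_eq_none_iff_not_mem_keys _ _).1 hgx)
          · have : S1.get? x = some vx := (h x) ▸ hgx
            exact PySem.Dict.mem_keys_of_mem_items _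
              ((PySem.Dict.get?_eq_some_iff_mem_items S1 x vx h1).1 this)
      have e1 : S1.size = S1.keys.length := by simp [PySem.Dict.size, PySem.Dict.keys]
      have e2 : S2.size = S2.keys.length := by simp [PySem.Dict.size, PySem.Dict.keys]
      rw [e1, e2, hperm.length_eq]
    · intro p hp
      have : S1.get? p.1 = some p.2 :=
        (PySem.Dict.get?_eq_some_iff_mem_items S1 p.1 p.2 h1).2 hp
      rw [← h p.1] at *
      simp [this]

-- ===== VERDICT (by name: the statement is the Claim_ definition above) =====
theorem deltas_are_equal_spec : Claim_equal_deltas_are_equal := by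
  intro d1 d2 _
  unfold Spec_deltas_are_equal deltas_are_equal deltas_are_equal_alt
  have h1 : (pvAsDict d1).keys.Nodup := PySem.Dict.nodup_keys_ofList _
  have h2 : (pvAsDict d2).keys.Nodup := PySem.Dict.nodup_keys_ofList _
  have hs1 := pvStrip_keys_nodup _ h1
  have hs2 := pvStrip_keys_nodup _ h2
  have hB : pvDictEqB (pvStrip (pvAsDict d1)) (pvStrip (pvAsDict d2)) = true
      ↔ ∀ k, (pvAsDict d1).getD k 0 = (pvAsDict d2).getD k 0 := by
    rw [pvDictEqB_true_iff _ _ hs1 hs2]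
    constructor
    · intro h k
      have := h k
      rw [pvStrip_get? _ h1, pvStrip_get? _ h2] at this
      by_cases e1 : (pvAsDict d1).getD k 0 = 0 <;> by_cases e2 : (pvAsDict d2).getD k 0 = 0 <;>
        simp [e1, e2] at this <;> simp [e1, e2, this]
    · intro h k
      rw [pvStrip_get? _ h1, pvStrip_get? _ h2, h k]
  have hA := pvLoopA_true_iff (pvAsDict d1) (pvAsDict d2)
  show pvLoopA _ _ _ = pvDictEqB (pvStrip (pvAsDict d1)) (pvStrip (pvAsDict d2))
  rcases hb : pvDictEqB (pvStrip (pvAsDict d1)) (pvStrip (pvAsDict d2)) with _ | _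
  · rcases ha : pvLoopA (pvAsDict d1) (pvAsDict d2) _ with _ | _
    · rfl
    · exact absurd (hB.2 (hA.1 ha)) (by simp [hb])
  · exact hA.2 (hB.1 hb)
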